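-- pv_equiv track=rewrite | github.com/nabangeeee/Algorithm | 프로그래머스/1/134240. 푸드 파이트 대회/푸드 파이트 대회.py | solution
-- ===== SOURCE A (Python) =====
-- def solution(food):
--     result = ""
--
--     for i in range(len(food)):
--         k = food[i] - (food[i] % 2)
--         food[i] = k
--         left = k // 2
--         right = k // 2
--
--         result = result + (str(i) * left)
--         result = (str(i) * left) + result
--
--     mid = len(result) // 2
--     result = result[mid::] + "0" + result[:mid:]
--
--     return result
-- ===== SOURCE B (Python) =====
-- def solution(food):
--     # keep A's in-place halving mutation of the argument
--     for i in range(len(food)):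
--         food[i] -= food[i] % 2
--     half = ''.join(str(i) * (food[i] // 2) for i in range(len(food)))
--     back = ''.join(str(i) * (food[i] // 2) for i in reversed(range(len(food))))
--     return half + '0' + back
-- ===== Notes on version B (the rewrite author's own statement) =====
-- stated objective: simpler
-- what changed: A accumulates the symmetric string by prepending and appending at every index and then splits it at the midpoint and swaps the halves; B builds the left half and the reverse-index-order right half directly with two joins, no midpoint slicing.
import Mathlib
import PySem

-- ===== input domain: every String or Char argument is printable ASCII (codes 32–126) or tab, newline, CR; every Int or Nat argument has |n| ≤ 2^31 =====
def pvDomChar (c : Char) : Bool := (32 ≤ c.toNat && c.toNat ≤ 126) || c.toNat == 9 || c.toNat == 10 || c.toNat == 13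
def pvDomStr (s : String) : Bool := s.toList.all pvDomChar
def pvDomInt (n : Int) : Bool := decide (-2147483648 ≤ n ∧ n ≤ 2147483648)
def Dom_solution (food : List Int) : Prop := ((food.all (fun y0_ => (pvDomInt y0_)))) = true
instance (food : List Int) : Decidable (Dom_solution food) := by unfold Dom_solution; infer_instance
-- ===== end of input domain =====

-- B replaces A's symmetric prepend/append accumulation plus midpoint split-and-swap by directly
-- joining the left half and the reverse-index-order right half; both mutate `food` in place the
-- same way in Python, and the theorems are about the return value.

-- ===== PORT A =====
def solution (food : List Int) : String :=
  let st := (PySem.List.pyRange 0 (food.length : Int) 1).foldl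
    (fun (st : List Int × List Char) i =>
      let food := st.1
      let result := st.2
      let k := PySem.List.pyGetD food i 0 - PySem.Int.mod (PySem.List.pyGetD food i 0) 2
      let food := PySem.List.pySetD food i k
      let left := PySem.Int.floordiv k 2
      let result := result ++ PySem.List.pyRepeat (PySem.Int.toChars i) left
      let result := PySem.List.pyRepeat (PySem.Int.toChars i) left ++ result
      (food, result))
    (food, [])
  let result := st.2
  let mid := PySem.Int.floordiv (result.length : Int) 2
  String.ofList (PySem.List.slice result (some mid) none ++ ['0'] ++ PySem.List.slice result none (some mid))

-- ===== PORT B =====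
def solution_alt (food : List Int) : String :=
  let food := (PySem.List.pyRange 0 (food.length : Int) 1).foldl
    (fun f i => PySem.List.pySetD f i (PySem.List.pyGetD f i 0 - PySem.Int.mod (PySem.List.pyGetD f i 0) 2)) food
  let half := ((PySem.List.pyRange 0 (food.length : Int) 1).map
      (fun i => PySem.List.pyRepeat (PySem.Int.toChars i) (PySem.Int.floordiv (PySem.List.pyGetD food i 0) 2))).flatten
  let back := ((PySem.List.pyRange 0 (food.length : Int) 1).reverse.map
      (fun i => PySem.List.pyRepeat (PySem.Int.toChars i) (PySem.Int.floordiv (PySem.List.pyGetD food i 0) 2))).flatten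
  String.ofList (half ++ ['0'] ++ back)

-- ===== PRECONDITION & SPEC =====
def Spec_solution (food : List Int) (out : String) : Prop := out = solution_alt food
instance (food : List Int) (out : String) : Decidable (Spec_solution food out) := by unfold Spec_solution; infer_instance

-- ===== CLAIM (what is proved, stated in full; the proofs are below) =====
def Claim_equal_solution : Prop := ∀ (food : List Int), Dom_solution food → Spec_solution food (solution food)

-- ===== LEMMAS AND PROOFS =====
-- per-index "halved" value, the block str(i)*(k//2), and the list of blocks from index a on
def gfun (x : Int) : Int := x - PySem.Int.mod x 2

def blk (a : Nat) (x : Int) : List Char :=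
  PySem.List.pyRepeat (PySem.Int.toChars (a : Int)) (PySem.Int.floordiv (gfun x) 2)

def blkL (a : Nat) : List Int → List (List Char)
  | [] => []
  | x :: xs => blk a x :: blkL (a + 1) xs

-- A's loop: state after processing indices done.length .. end, starting from a prefix-mutated list
theorem foldA (rest : List Int) : ∀ (done : List Int) (R : List Char),
    (PySem.List.pyRange (done.length : Int) ((done.length + rest.length : Nat) : Int) 1).foldl
      (fun (st : List Int × List Char) i =>
        let food := st.1
        let result := st.2
        let k := PySem.List.pyGetD food i 0 - PySem.Int.mod (PySem.List.pyGetD food i 0) 2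
        let food := PySem.List.pySetD food i k
        let left := PySem.Int.floordiv k 2
        let result := result ++ PySem.List.pyRepeat (PySem.Int.toChars i) left
        let result := PySem.List.pyRepeat (PySem.Int.toChars i) left ++ result
        (food, result))
      (done.map gfun ++ rest, R)
    = ((done ++ rest).map gfun, (blkL done.length rest).reverse.flatten ++ R ++ (blkL done.length rest).flatten) := by
  induction rest with
  | nil => intro done R; simp [PySem.List.pyRange_one_eq_nil, blkL]
  | cons x xs ih =>
    intro done R
    have h : (done.length : Int) < ((done.length + (x :: xs).length : Nat) : Int) := by
      push_cast [List.length_cons]; omega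
    rw [PySem.List.pyRange_one_cons h, List.foldl_cons]
    have h1 : PySem.List.pyGetD (done.map gfun ++ x :: xs) (done.length : Int) 0 = x := by
      simp [List.getD_eq_getElem?_getD]
    have h2 : PySem.List.pySetD (done.map gfun ++ x :: xs) (done.length : Int) (x - PySem.Int.mod x 2)
        = (done ++ [x]).map gfun ++ xs := by
      simp [gfun]
    simp only [h1, h2]
    have := ih (done ++ [x]) (PySem.List.pyRepeat (PySem.Int.toChars (done.length : Int)) (PySem.Int.floordiv (x - PySem.Int.mod x 2) 2) ++ (R ++ PySem.List.pyRepeat (PySem.Int.toChars (done.length : Int)) (PySem.Int.floordiv (x - PySem.Int.mod x 2) 2)))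
    have hc : ((done ++ [x]).length : Int) = (done.length : Int) + 1 := by simp
    have hc2 : ((done ++ [x]).length + xs.length : Nat) = (done.length + (x :: xs).length : Nat) := by
      simp; omega
    rw [hc, hc2] at this
    refine this.trans ?_
    simp [blkL, blk, gfun, List.append_assoc]

-- B's mutation loop halves every entry
theorem foldB (rest : List Int) : ∀ (done : List Int),
    (PySem.List.pyRange (done.length : Int) ((done.length + rest.length : Nat) : Int) 1).foldl
      (fun f i => PySem.List.pySetD f i (PySem.List.pyGetD f i 0 - PySem.Int.mod (PySem.List.pyGetD f i 0) 2))
      (done.map gfun ++ rest)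
    = (done ++ rest).map gfun := by
  induction rest with
  | nil => intro done; simp [PySem.List.pyRange_one_eq_nil]
  | cons x xs ih =>
    intro done
    have h : (done.length : Int) < ((done.length + (x :: xs).length : Nat) : Int) := by
      push_cast [List.length_cons]; omega
    rw [PySem.List.pyRange_one_cons h, List.foldl_cons]
    have h1 : PySem.List.pyGetD (done.map gfun ++ x :: xs) (done.length : Int) 0 = x := by
      simp [List.getD_eq_getElem?_getD]
    have h2 : PySem.List.pySetD (done.map gfun ++ x :: xs) (done.length : Int) (x - PySem.Int.mod x 2)
        = (done ++ [x]).map gfun ++ xs := by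
      simp [gfun]
    rw [h1, h2]
    have := ih (done ++ [x])
    have hc : ((done ++ [x]).length : Int) = (done.length : Int) + 1 := by simp
    have hc2 : ((done ++ [x]).length + xs.length : Nat) = (done.length + (x :: xs).length : Nat) := by
      simp; omega
    rw [hc, hc2] at this
    rw [this]
    simp

-- B's half-building comprehension produces exactly the block list
theorem mapB (rest : List Int) : ∀ (done : List Int),
    (PySem.List.pyRange (done.length : Int) ((done.length + rest.length : Nat) : Int) 1).map
      (fun i => PySem.List.pyRepeat (PySem.Int.toChars i)
        (PySem.Int.floordiv (PySem.List.pyGetD ((done ++ rest).map gfun) i 0) 2))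
    = blkL done.length rest := by
  induction rest with
  | nil => intro done; simp [PySem.List.pyRange_one_eq_nil, blkL]
  | cons x xs ih =>
    intro done
    have h : (done.length : Int) < ((done.length + (x :: xs).length : Nat) : Int) := by
      push_cast [List.length_cons]; omega
    rw [PySem.List.pyRange_one_cons h, List.map_cons]
    have h1 : PySem.List.pyGetD ((done ++ x :: xs).map gfun) (done.length : Int) 0 = gfun x := by
      simp [List.getD_eq_getElem?_getD]
    rw [h1]
    have := ih (done ++ [x])
    have hc : ((done ++ [x]).length : Int) = (done.length : Int) + 1 := by simp
    have hc2 : ((done ++ [x]).length + xs.length : Nat) = (done.length + (x :: xs).length : Nat) := by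
      simp; omega
    rw [hc, hc2, List.append_assoc, List.singleton_append] at this
    rw [this]
    simp [blkL, blk]

theorem len_rev_flatten (l : List (List Char)) : (l.reverse.flatten).length = (l.flatten).length := by
  simp [List.length_flatten, List.map_reverse, List.sum_reverse]

-- ===== VERDICT (by name: the statement is the Claim_ definition above) =====
theorem solution_spec : Claim_equal_solution := by
  intro food _
  unfold Spec_solution
  have hA := foldA food [] []
  have hB := foldB food []
  have hM := mapB food []
  simp only [List.length_nil, Nat.cast_zero, Nat.zero_add, List.map_nil, List.nil_append,
    List.append_nil] at hA hB hM
  unfold solution solution_alt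
  rw [hA, hB]
  simp only [List.map_reverse, List.length_map]
  rw [hM]
  have hlen : ((blkL 0 food).reverse.flatten ++ (blkL 0 food).flatten).length
      = (blkL 0 food).flatten.length + (blkL 0 food).flatten.length := by
    rw [List.length_append, len_rev_flatten]
  rw [hlen]
  have hmid : PySem.Int.floordiv (((blkL 0 food).flatten.length + (blkL 0 food).flatten.length : Nat) : Int) 2
      = (((blkL 0 food).flatten.length : Nat) : Int) := by
    rw [PySem.Int.floordiv_eq_ediv_of_pos (by omega)]
    push_cast
    omega
  rw [hmid, PySem.List.slice_from_natCast, PySem.List.slice_to_natCast]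
  have h1 : ((blkL 0 food).reverse.flatten ++ (blkL 0 food).flatten).drop (blkL 0 food).flatten.length
      = (blkL 0 food).flatten := by
    rw [← len_rev_flatten]; exact List.drop_left
  have h2 : ((blkL 0 food).reverse.flatten ++ (blkL 0 food).flatten).take (blkL 0 food).flatten.length
      = (blkL 0 food).reverse.flatten := by
    rw [← len_rev_flatten]; exact List.take_left
  rw [h1, h2]
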